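-- pv_equiv track=rewrite | github.com/albalaka/trade-dst | dataset_analysis.py | compare_NER_IN_GT
-- ===== SOURCE A (Python) =====
-- def compare_NER_IN_GT(GT, NER):
--     TP, FP, FN = 0, 0, 0
--     samples_TP, samples_FP, samples_FN = [], [], []
--     for pred in NER:
--         found = False
--         for label in GT:
--             if label in pred:
--                 TP += 1
--                 samples_TP.append(pred)
--                 found = True
--         if not found:
--             FP += 1
--             samples_FP.append(pred)
--
--     for label in GT:
--         found = False
--         for pred in NER:
--             if label in pred:
--                 found = True
--         if not found:
--             FN += 1
--             samples_FN.append(label)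
--
--     return TP, samples_TP, FP, samples_FP, FN, samples_FN
-- ===== SOURCE B (Python) =====
-- def compare_NER_IN_GT(GT, NER):
--     TP, FP = 0, 0
--     samples_TP, samples_FP = [], []
--     matched = [False] * len(GT)
--     for pred in NER:
--         hits = [label in pred for label in GT]
--         k = sum(hits)
--         if k:
--             TP += k
--             samples_TP.extend([pred] * k)
--         else:
--             FP += 1
--             samples_FP.append(pred)
--         matched = [m or h for m, h in zip(matched, hits)]
--     samples_FN = [label for label, m in zip(GT, matched) if not m]
--     return TP, samples_TP, FP, samples_FP, len(samples_FN), samples_FN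
-- ===== Notes on version B (the rewrite author's own statement) =====
-- stated objective: alternative
-- what changed: Single fused pass over NER computes a per-pred hit vector (driving TP/FP and a matched table via zip-or), and FN/samples_FN fall out of one final comprehension over GT zipped with matched, replacing A's second nested GT-by-NER scan.
import Mathlib
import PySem

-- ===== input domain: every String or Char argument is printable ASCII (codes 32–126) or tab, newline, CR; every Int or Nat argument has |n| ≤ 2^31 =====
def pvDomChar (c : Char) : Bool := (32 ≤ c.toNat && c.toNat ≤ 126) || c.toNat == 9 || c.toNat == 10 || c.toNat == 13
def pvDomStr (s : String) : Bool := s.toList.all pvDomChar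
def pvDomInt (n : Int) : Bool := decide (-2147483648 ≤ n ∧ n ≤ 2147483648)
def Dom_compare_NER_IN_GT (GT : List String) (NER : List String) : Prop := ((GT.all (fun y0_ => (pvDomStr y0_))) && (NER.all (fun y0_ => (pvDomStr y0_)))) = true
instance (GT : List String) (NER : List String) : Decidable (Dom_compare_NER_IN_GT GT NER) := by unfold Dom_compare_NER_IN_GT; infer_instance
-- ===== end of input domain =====

-- B fuses A's two nested double loops into one pass over NER that also maintains a matched
-- table for GT; FN/samples_FN come from one final linear pass (objective: alternative
-- decomposition, same asymptotic cost).

-- ===== PORT A =====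
-- Literal transliteration of A.  Each Python loop body is a named step function folded over
-- the same state; 'label in pred' is PySem.Str.isIn.

-- body of A's inner 'for label in GT' loop (state: TP, samples_TP, found)
def pvAinnerstep (pred : String) (st2 : Int × List String × Bool) (label : String) : Int × List String × Bool :=
  let (TP, sTP, found) := st2
  if PySem.Str.isIn label pred then (TP + 1, sTP ++ [pred], true) else (TP, sTP, found)

-- body of A's first 'for pred in NER' loop (state: TP, samples_TP, FP, samples_FP)
def pvAstep (GT : List String) (st : Int × List String × Int × List String) (pred : String) : Int × List String × Int × List String :=
  let (TP, sTP, FP, sFP) := st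
  let inner := GT.foldl (pvAinnerstep pred) (TP, sTP, false)
  let (TP, sTP, found) := inner
  if !found then (TP, sTP, FP + 1, sFP ++ [pred]) else (TP, sTP, FP, sFP)

-- body of A's inner 'for pred in NER' found-loop
def pvAfoundstep (label : String) (f : Bool) (pred : String) : Bool :=
  if PySem.Str.isIn label pred then true else f

-- body of A's second 'for label in GT' loop (state: FN, samples_FN)
def pvA2step (NER : List String) (st : Int × List String) (label : String) : Int × List String :=
  let (FN, sFN) := st
  let found := NER.foldl (pvAfoundstep label) false
  if !found then (FN + 1, sFN ++ [label]) else (FN, sFN)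

def compare_NER_IN_GT (GT : List String) (NER : List String) : Int × List String × Int × List String × Int × List String :=
  let s1 := NER.foldl (pvAstep GT) (0, [], 0, [])
  let (TP, sTP, FP, sFP) := s1
  let s2 := GT.foldl (pvA2step NER) (0, [])
  let (FN, sFN) := s2
  (TP, sTP, FP, sFP, FN, sFN)

-- ===== PORT B =====
-- Literal transliteration of Source B: one pass over NER; per pred a hit vector over GT drives
-- TP/samples_TP (via count/replicate) or FP/samples_FP, and the matched table is or-ed with
-- the hits; samples_FN/FN from one final filter over zip(GT, matched).

-- body of B's single 'for pred in NER' loop (state: TP, samples_TP, FP, samples_FP, matched)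
def pvBstep (GT : List String) (st : Int × List String × Int × List String × List Bool) (pred : String) : Int × List String × Int × List String × List Bool :=
  let (TP, sTP, FP, sFP, matched) := st
  let hits := GT.map (fun label => PySem.Str.isIn label pred)
  let k := hits.count true
  let (TP, sTP, FP, sFP) :=
    if k ≠ 0 then (TP + (k : Int), sTP ++ List.replicate k pred, FP, sFP)
    else (TP, sTP, FP + 1, sFP ++ [pred])
  (TP, sTP, FP, sFP, List.zipWith (fun m h => m || h) matched hits)

def compare_NER_IN_GT_alt (GT : List String) (NER : List String) : Int × List String × Int × List String × Int × List String :=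
  let st := NER.foldl (pvBstep GT) (0, [], 0, [], List.replicate GT.length false)
  let (TP, sTP, FP, sFP, matched) := st
  let sFN := ((GT.zip matched).filter (fun p => !p.2)).map Prod.fst
  (TP, sTP, FP, sFP, (sFN.length : Int), sFN)

-- ===== PRECONDITION & SPEC =====
def Spec_compare_NER_IN_GT (GT : List String) (NER : List String) (out : Int × List String × Int × List String × Int × List String) : Prop := out = compare_NER_IN_GT_alt GT NER
instance (GT : List String) (NER : List String) (out : Int × List String × Int × List String × Int × List String) : Decidable (Spec_compare_NER_IN_GT GT NER out) := by unfold Spec_compare_NER_IN_GT; infer_instance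

-- ===== CLAIM (what is proved, stated in full; the proofs are below) =====
def Claim_equal_compare_NER_IN_GT : Prop := ∀ (GT : List String) (NER : List String), Dom_compare_NER_IN_GT GT NER → Spec_compare_NER_IN_GT GT NER (compare_NER_IN_GT GT NER)

-- ===== LEMMAS AND PROOFS =====

-- count of true over a mapped boolean list is countP
theorem pv_countTrue_map (f : String → Bool) (GT : List String) :
    (GT.map f).count true = GT.countP f := by
  induction GT with
  | nil => rfl
  | cons a gt ih => by_cases h : f a <;> simp [h, List.count_cons, List.countP_cons, ih]

theorem pv_any_iff_countP (f : String → Bool) (GT : List String) :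
    GT.any f = true ↔ GT.countP f ≠ 0 := by
  induction GT with
  | nil => simp
  | cons a gt ih => by_cases h : f a <;> simp [h, List.countP_cons, ih] <;> omega

-- A's inner loop over GT: adds the number of hits to TP, appends pred that many times,
-- ors `found` with "some label hits"
theorem pv_innerA (pred : String) (GT : List String) (TP : Int) (sTP : List String) (found : Bool) :
    GT.foldl (pvAinnerstep pred) (TP, sTP, found)
    = (TP + ((GT.countP (fun l => PySem.Str.isIn l pred)) : Int),
       sTP ++ List.replicate (GT.countP (fun l => PySem.Str.isIn l pred)) pred,
       found || GT.any (fun l => PySem.Str.isIn l pred)) := by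
  induction GT generalizing TP sTP found with
  | nil => simp
  | cons l gt ih =>
    simp only [List.foldl_cons, pvAinnerstep, PySem.Str.isIn_eq]
    by_cases h : PySem.Chars.isIn l.toList pred.toList
    · rw [if_pos h, ih]
      simp [h, List.countP_cons, List.any_cons, List.replicate_succ, List.append_assoc,
        Prod.mk.injEq]
      all_goals push_cast
      all_goals omega
    · rw [if_neg h, ih]
      simp [List.countP_cons, List.any_cons,
        show PySem.Chars.isIn l.toList pred.toList = false by simpa using h]

-- A's found-fold over NER equals f || any
theorem pv_foundA (label : String) (NER : List String) (f : Bool) :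
    NER.foldl (pvAfoundstep label) f = (f || NER.any (fun pred => PySem.Str.isIn label pred)) := by
  induction NER generalizing f with
  | nil => simp
  | cons p ps ih =>
    simp only [List.foldl_cons, pvAfoundstep, PySem.Str.isIn_eq]
    by_cases h : PySem.Chars.isIn label.toList p.toList
    · rw [if_pos h, ih]; simp [h]
    · rw [if_neg h, ih]
      simp [show PySem.Chars.isIn label.toList p.toList = false by simpa using h]

-- A's second loop over GT: closed form via the filter of unmatched labels
theorem pv_loop2A (NER : List String) (GT : List String) (FN : Int) (sFN : List String) :
    GT.foldl (pvA2step NER) (FN, sFN)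
    = (FN + (((GT.filter (fun l => !NER.any (fun p => PySem.Str.isIn l p))).length : Int)),
       sFN ++ GT.filter (fun l => !NER.any (fun p => PySem.Str.isIn l p))) := by
  induction GT generalizing FN sFN with
  | nil => simp
  | cons l gt ih =>
    simp only [List.foldl_cons, pvA2step, pv_foundA, Bool.false_or, List.filter_cons]
    by_cases h : NER.any (fun p => PySem.Str.isIn l p)
    · simp only [h, Bool.not_true, Bool.false_eq_true, if_false]
      exact ih FN sFN
    · have h' : NER.any (fun p => PySem.Str.isIn l p) = false := by simpa using h
      simp only [h', Bool.not_false, if_true]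
      rw [ih]
      simp [Prod.mk.injEq, List.append_assoc]
      all_goals push_cast
      all_goals omega

theorem pv_zipWith_self_id {α : Type} (m : List Bool) (GT : List α) (h : m.length = GT.length) :
    List.zipWith (fun b _ => b) m GT = m := by
  induction m generalizing GT with
  | nil => simp
  | cons b bs ih =>
    cases GT with
    | nil => simp at h
    | cons g gs => simp_all

-- or-ing one pred's hit vector into the matched table, seen through the final any
theorem pv_zipWith_or_step (p : String) (ps : List String) (m : List Bool) (GT : List String) :
    List.zipWith (fun b l => b || ps.any (fun p' => PySem.Str.isIn l p'))
      (List.zipWith (fun m h => m || h) m (GT.map (fun label => PySem.Str.isIn label p))) GT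
    = List.zipWith (fun b l => b || (p :: ps).any (fun p' => PySem.Str.isIn l p')) m GT := by
  induction m generalizing GT with
  | nil => simp
  | cons b bs ih =>
    cases GT with
    | nil => simp
    | cons g gs =>
      simp only [List.map_cons, List.zipWith_cons_cons]
      rw [ih gs]
      simp only [List.any_cons, Bool.or_assoc]

-- B's single pass equals A's first loop, plus the matched table in closed form
theorem pv_outerAB (GT : List String) (NER : List String) (TP : Int) (sTP : List String)
    (FP : Int) (sFP : List String) (m : List Bool) (hm : m.length = GT.length) :
    NER.foldl (pvBstep GT) (TP, sTP, FP, sFP, m)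
    = ((NER.foldl (pvAstep GT) (TP, sTP, FP, sFP)).1,
       (NER.foldl (pvAstep GT) (TP, sTP, FP, sFP)).2.1,
       (NER.foldl (pvAstep GT) (TP, sTP, FP, sFP)).2.2.1,
       (NER.foldl (pvAstep GT) (TP, sTP, FP, sFP)).2.2.2,
       List.zipWith (fun b l => b || NER.any (fun p => PySem.Str.isIn l p)) m GT) := by
  induction NER generalizing TP sTP FP sFP m with
  | nil =>
    simp only [List.foldl_nil, List.any_nil, Bool.or_false]
    rw [pv_zipWith_self_id m GT hm]
  | cons p ps ih =>
    simp only [List.foldl_cons, pvBstep, pvAstep, pv_countTrue_map, pv_innerA, Bool.false_or]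
    by_cases hany : GT.any (fun l => PySem.Str.isIn l p)
    · have hk := (pv_any_iff_countP (fun l => PySem.Str.isIn l p) GT).mp hany
      rw [if_pos hk]
      dsimp only
      rw [ih _ _ _ _ _ (by simp [hm])]
      simp only [hany, Bool.not_true, Bool.false_eq_true, if_false]
      simp only [Prod.mk.injEq, true_and]
      rw [pv_zipWith_or_step]
    · have h' : GT.any (fun l => PySem.Str.isIn l p) = false := by simpa using hany
      have hk : GT.countP (fun l => PySem.Str.isIn l p) = 0 := by
        by_contra hc
        exact hany ((pv_any_iff_countP (fun l => PySem.Str.isIn l p) GT).mpr hc)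
      rw [if_neg (not_not_intro hk)]
      dsimp only
      rw [ih _ _ _ _ _ (by simp [hm])]
      simp only [h', Bool.not_false, if_true, hk, Nat.cast_zero, add_zero,
        List.replicate_zero, List.append_nil]
      simp only [Prod.mk.injEq, true_and]
      rw [pv_zipWith_or_step]

-- the initial all-false matched table seen through the closed form is the per-label any
theorem pv_zipWith_replicate_false (NER : List String) (GT : List String) :
    List.zipWith (fun (b : Bool) l => b || NER.any (fun p => PySem.Str.isIn l p))
      (List.replicate GT.length false) GT
    = GT.map (fun l => NER.any (fun p => PySem.Str.isIn l p)) := by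
  induction GT with
  | nil => simp
  | cons l gt ih =>
    simp only [List.length_cons, List.replicate_succ, List.zipWith_cons_cons, List.map_cons,
      Bool.false_or]
    rw [ih]

-- B's final comprehension over zip(GT, matched) is the filter of unmatched labels
theorem pv_filter_zip_map (NER : List String) (GT : List String) :
    (((GT.zip (GT.map (fun l => NER.any (fun p => PySem.Str.isIn l p)))).filter
        (fun p => !p.2)).map Prod.fst)
    = GT.filter (fun l => !NER.any (fun p => PySem.Str.isIn l p)) := by
  induction GT with
  | nil => simp
  | cons l gt ih =>
    by_cases h : NER.any (fun p => PySem.Str.isIn l p) <;>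
      simp only [List.map_cons, List.zip_cons_cons, List.filter_cons, h, Bool.not_true,
        Bool.not_false, Bool.false_eq_true, if_false, if_true, ih]

-- ===== VERDICT (by name: the statement is the Claim_ definition above) =====
theorem compare_NER_IN_GT_spec : Claim_equal_compare_NER_IN_GT := by
  intro GT NER _
  unfold Spec_compare_NER_IN_GT
  show compare_NER_IN_GT GT NER = compare_NER_IN_GT_alt GT NER
  simp only [compare_NER_IN_GT, compare_NER_IN_GT_alt]
  rw [pv_loop2A NER GT 0 []]
  rw [pv_outerAB GT NER 0 [] 0 [] (List.replicate GT.length false) (by simp)]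
  rw [pv_zipWith_replicate_false NER GT, pv_filter_zip_map NER GT]
  rcases hA : NER.foldl (pvAstep GT) (0, [], 0, []) with ⟨TP, sTP, FP, sFP⟩
  simp
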